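-- pv_equiv track=rewrite | github.com/MartinusChoi/Algorithm-PlayGround | Algorithm/Data_Structure/hash/practice_4.py | solution
-- ===== SOURCE A (Python) =====
-- def get_hash_table(want:list, number:list) -> dict:
--     return {product:amount for product, amount in zip(want, number)}
--
-- def solution(want:list, number:list, discount:list):
--     window_left = 0
--     window_right = 10
--     good_days = 0
--
--     while window_right <= len(discount):
--         hash_table = get_hash_table(want, number)
--         discount_window = discount[window_left:window_right]
--         completed_product = 0
--
--         for product in discount_window:
--             if product in hash_table.keys():
--                 hash_table[product] -= 1
--                 if hash_table[product] == 0 : completed_product += 1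
--
--         if completed_product == len(want) : good_days += 1
--
--         window_left += 1
--         window_right += 1
--
--     return good_days
-- ===== SOURCE B (Python) =====
-- def solution(want, number, discount):
--     # Sliding 10-day window: keep per-product counts and a counter of wanted
--     # products currently at (or past) their required amount, updating both in
--     # O(1) per day instead of rescanning the whole window.
--     if len(discount) < 10:
--         return 0
--     req = {}
--     for p, a in zip(want, number):
--         req[p] = a
--     cnt = {}
--     sat = 0
--     for p in discount[:10]:
--         if p in req:
--             cnt[p] = cnt.get(p, 0) + 1
--             if cnt[p] == req[p]:
--                 sat += 1
--     good = 1 if sat == len(want) else 0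
--     for incoming, outgoing in zip(discount[10:], discount):
--         if outgoing in req:
--             if cnt.get(outgoing, 0) == req[outgoing]:
--                 sat -= 1
--             cnt[outgoing] = cnt.get(outgoing, 0) - 1
--         if incoming in req:
--             cnt[incoming] = cnt.get(incoming, 0) + 1
--             if cnt[incoming] == req[incoming]:
--                 sat += 1
--         if sat == len(want):
--             good += 1
--     return good
-- ===== Notes on version B (the rewrite author's own statement) =====
-- stated objective: faster
-- what changed: Replaces the per-window rebuild of the product dict and rescan of every 10-day slice with a single sliding-window pass that maintains incremental per-product counts and a satisfied-product counter.
import Mathlib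
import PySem

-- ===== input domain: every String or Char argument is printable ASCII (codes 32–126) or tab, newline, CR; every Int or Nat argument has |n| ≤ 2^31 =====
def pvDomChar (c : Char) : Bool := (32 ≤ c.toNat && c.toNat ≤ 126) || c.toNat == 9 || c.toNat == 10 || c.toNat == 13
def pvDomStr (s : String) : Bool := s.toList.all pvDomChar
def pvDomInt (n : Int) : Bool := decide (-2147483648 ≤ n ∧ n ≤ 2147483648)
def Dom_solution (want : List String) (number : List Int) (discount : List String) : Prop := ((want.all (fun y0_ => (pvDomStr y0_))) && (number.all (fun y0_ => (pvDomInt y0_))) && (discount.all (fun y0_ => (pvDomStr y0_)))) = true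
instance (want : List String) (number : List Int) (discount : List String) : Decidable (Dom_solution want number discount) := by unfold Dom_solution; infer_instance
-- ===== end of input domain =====

-- B replaces A's per-window dict rebuild + rescan by one sliding-window pass with
-- incremental counts and a satisfied-product counter (objective: faster).

-- ===== PORT A =====
def get_hash_table (want : List String) (number : List Int) : PySem.Dict String Int :=
  (want.zip number).foldl (fun d pa => d.insert pa.1 pa.2) PySem.Dict.empty

-- 'for product in discount_window: …' of A, state = (hash_table, completed)
def innerLoopA (window : List String) (ht : PySem.Dict String Int) (completed : Int) :
    PySem.Dict String Int × Int :=
  match window with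
  | [] => (ht, completed)
  | p :: rest =>
    if ht.contains p then
      let ht' := ht.insert p (ht.getD p 0 - 1)
      let completed' := if ht'.getD p 0 == 0 then completed + 1 else completed
      innerLoopA rest ht' completed'
    else innerLoopA rest ht completed

-- A's 'while window_right <= len(discount)' loop
def whileA (want : List String) (number : List Int) (discount : List String)
    (wl wr good : Int) : Int :=
  if h : wr ≤ (discount.length : Int) then
    let ht := get_hash_table want number
    let dw := PySem.List.slice discount (some wl) (some wr)
    let completed := (innerLoopA dw ht 0).2
    let good' := if completed == (want.length : Int) then good + 1 else good
    whileA want number discount (wl + 1) (wr + 1) good'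
  else good
termination_by ((discount.length : Int) + 1 - wr).toNat
decreasing_by omega

def solution (want : List String) (number : List Int) (discount : List String) : Int :=
  whileA want number discount 0 10 0

-- ===== PORT B =====
-- 'for p, a in zip(want, number): req[p] = a'
def buildReq (want : List String) (number : List Int) : PySem.Dict String Int :=
  (want.zip number).foldl (fun d pa => d.insert pa.1 pa.2) PySem.Dict.empty

-- body of B's first loop: add day p to the window, state = (cnt, sat)
def addStep (req : PySem.Dict String Int) (s : PySem.Dict String Int × Int) (p : String) :
    PySem.Dict String Int × Int :=
  if req.contains p then
    let cnt := s.1.insert p (s.1.getD p 0 + 1)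
    (cnt, if cnt.getD p 0 == req.getD p 0 then s.2 + 1 else s.2)
  else s

-- the 'if outgoing in req' half of B's second loop
def removeStep (req : PySem.Dict String Int) (s : PySem.Dict String Int × Int) (p : String) :
    PySem.Dict String Int × Int :=
  if req.contains p then
    let sat := if s.1.getD p 0 == req.getD p 0 then s.2 - 1 else s.2
    (s.1.insert p (s.1.getD p 0 - 1), sat)
  else s

-- body of B's second loop, state = (cnt, sat, good), element = (incoming, outgoing)
def slideStep (req : PySem.Dict String Int) (wantLen : Int)
    (s : PySem.Dict String Int × Int × Int) (pq : String × String) :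
    PySem.Dict String Int × Int × Int :=
  let s1 := removeStep req (s.1, s.2.1) pq.2
  let s2 := addStep req s1 pq.1
  (s2.1, s2.2, if s2.2 == wantLen then s.2.2 + 1 else s.2.2)

def solution_alt (want : List String) (number : List Int) (discount : List String) : Int :=
  if (discount.length : Int) < 10 then 0
  else
    let req := buildReq want number
    let s0 := (PySem.List.slice discount none (some 10)).foldl (addStep req)
        (PySem.Dict.empty, 0)
    let good0 : Int := if s0.2 == (want.length : Int) then 1 else 0
    let fin := ((PySem.List.slice discount (some 10) none).zip discount).foldl
        (slideStep req (want.length : Int)) (s0.1, s0.2, good0)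
    fin.2.2

-- ===== PRECONDITION & SPEC =====
def Spec_solution (want : List String) (number : List Int) (discount : List String) (out : Int) : Prop := out = solution_alt want number discount
instance (want : List String) (number : List Int) (discount : List String) (out : Int) : Decidable (Spec_solution want number discount out) := by unfold Spec_solution; infer_instance

-- ===== CLAIM (what is proved, stated in full; the proofs are below) =====
def Claim_equal_solution : Prop := ∀ (want : List String) (number : List Int) (discount : List String), Dom_solution want number discount → Spec_solution want number discount (solution want number discount)

-- ===== LEMMAS AND PROOFS =====

-- number of wanted products currently 'completed' under supply f: required amount r has 1 ≤ r ≤ f k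
def satSum (d : PySem.Dict String Int) (f : String → Int) : Int :=
  (d.keys.map (fun k => if 1 ≤ d.getD k 0 ∧ d.getD k 0 ≤ f k then (1:Int) else 0)).sum

-- number of good windows at positions ≥ j
def goodCnt (req : PySem.Dict String Int) (W : Int) (discount : List String) (j : Nat) : Int :=
  if j + 10 ≤ discount.length then
    (if satSum req (fun k => (((discount.drop j).take 10).count k : Int)) = W then 1 else 0)
      + goodCnt req W discount (j + 1)
  else 0
termination_by discount.length - j
decreasing_by omega

lemma sum_map_update {κ : Type} [DecidableEq κ] (l : List κ) (f g : κ → Int) (p : κ)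
    (hnd : l.Nodup) (hp : p ∈ l) (h : ∀ k ∈ l, k ≠ p → f k = g k) :
    (l.map f).sum = (l.map g).sum + (f p - g p) := by
  induction l with
  | nil => cases hp
  | cons a t ih =>
    rcases List.nodup_cons.mp hnd with ⟨hat, hndt⟩
    rcases List.mem_cons.mp hp with rfl | hpt
    · have : t.map f = t.map g := by
        apply List.map_congr_left
        intro k hk
        exact h k (List.mem_cons_of_mem _ hk) (fun e => hat (e ▸ hk))
      simp [this]; ring
    · have haf : f a = g a := h a (List.mem_cons_self) (fun e => hat (e ▸ hpt))
      have := ih hndt hpt (fun k hk hkp => h k (List.mem_cons_of_mem _ hk) hkp)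
      simp [haf, this]; ring

lemma satSum_congr (d : PySem.Dict String Int) (f g : String → Int)
    (h : ∀ k ∈ d.keys, f k = g k) : satSum d f = satSum d g := by
  unfold satSum
  congr 1
  apply List.map_congr_left
  intro k hk
  rw [h k hk]

lemma satSum_zero (d : PySem.Dict String Int) (f : String → Int)
    (h : ∀ k ∈ d.keys, f k ≤ 0) : satSum d f = 0 := by
  unfold satSum
  have : ∀ k ∈ d.keys, (if 1 ≤ d.getD k 0 ∧ d.getD k 0 ≤ f k then (1:Int) else 0) = 0 := by
    intro k hk
    have := h k hk
    split_ifs with hc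
    · omega
    · rfl
  rw [List.map_congr_left this]
  simp

lemma satSum_incr (d : PySem.Dict String Int) (hnd : d.keys.Nodup) {p : String}
    (hp : p ∈ d.keys) (f : String → Int) (hf : 0 ≤ f p) :
    satSum d (fun k => if k = p then f p + 1 else f k)
      = satSum d f + (if f p + 1 = d.getD p 0 then 1 else 0) := by
  unfold satSum
  rw [sum_map_update _ _ (fun k => if 1 ≤ d.getD k 0 ∧ d.getD k 0 ≤ f k then (1:Int) else 0) p hnd hp]
  · beta_reduce
    rw [if_pos (rfl : p = p)]
    split_ifs <;> omega
  · intro k hk hkp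
    simp [if_neg hkp]

lemma satSum_decr (d : PySem.Dict String Int) (hnd : d.keys.Nodup) {p : String}
    (hp : p ∈ d.keys) (f : String → Int) (hf : 1 ≤ f p) :
    satSum d (fun k => if k = p then f p - 1 else f k)
      = satSum d f - (if f p = d.getD p 0 then 1 else 0) := by
  unfold satSum
  rw [sum_map_update _ _ (fun k => if 1 ≤ d.getD k 0 ∧ d.getD k 0 ≤ f k then (1:Int) else 0) p hnd hp]
  · beta_reduce
    rw [if_pos (rfl : p = p)]
    split_ifs <;> omega
  · intro k hk hkp
    simp [if_neg hkp]

lemma buildReq_eq (want : List String) (number : List Int) :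
    buildReq want number = get_hash_table want number := rfl

lemma nodup_keys_req (want : List String) (number : List Int) :
    (get_hash_table want number).keys.Nodup :=
  PySem.Dict.nodup_keys_foldl_insert_key (want.zip number) (fun pa => pa.1)
    (fun _ pa => pa.2) PySem.Dict.empty PySem.Dict.nodup_keys_empty

lemma innerLoopA_snd : ∀ (w : List String) (d : PySem.Dict String Int), d.keys.Nodup →
    ∀ (c : Int), (innerLoopA w d c).2 = c + satSum d (fun k => (w.count k : Int)) := by
  intro w
  induction w with
  | nil =>
    intro d hnd c
    rw [satSum_zero d _ (by intro k _; simp)]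
    simp [innerLoopA]
  | cons p rest ih =>
    intro d hnd c
    rw [innerLoopA]
    by_cases hc : d.contains p = true
    · simp only [hc, if_true]
      have hp : p ∈ d.keys := (PySem.Dict.contains_iff_mem_keys d p).mp hc
      have hgd : (d.insert p (d.getD p 0 - 1)).getD p 0 = d.getD p 0 - 1 :=
        PySem.Dict.getD_insert_self d p _ 0
      have hkeys : (d.insert p (d.getD p 0 - 1)).keys = d.keys :=
        PySem.Dict.keys_insert_of_contains d _ hc
      have hnd' : (d.insert p (d.getD p 0 - 1)).keys.Nodup := by rw [hkeys]; exact hnd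
      rw [ih _ hnd']
      unfold satSum
      rw [hkeys]
      rw [sum_map_update d.keys _
        (fun k => if 1 ≤ d.getD k 0 ∧ d.getD k 0 ≤ ((p :: rest).count k : Int) then (1:Int) else 0)
        p hnd hp ?side]
      case side =>
        intro k hk hkp
        have hcount : (p :: rest).count k = rest.count k := by
          rw [List.count_cons]; simp [Ne.symm hkp]
        have hgk : (d.insert p (d.getD p 0 - 1)).getD k 0 = d.getD k 0 :=
          PySem.Dict.getD_insert_of_ne d _ 0 hkp
        simp only [hcount, hgk]
      · have hcnt : (p :: rest).count p = rest.count p + 1 := by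
          rw [List.count_cons]; simp
        have hnn : (0:Int) ≤ (rest.count p : Int) := Int.natCast_nonneg _
        simp only [hgd, hcnt, Nat.cast_add, Nat.cast_one, beq_iff_eq]
        split_ifs <;> omega
    · simp only [hc]
      simp only [Bool.false_eq_true, if_false]
      rw [ih _ hnd]
      congr 1
      apply satSum_congr
      intro k hk
      have hkp : k ≠ p := fun e => hc ((PySem.Dict.contains_iff_mem_keys d p).mpr (e ▸ hk))
      rw [List.count_cons]
      simp [Ne.symm hkp]

lemma addStep_inv (req : PySem.Dict String Int) (hnd : req.keys.Nodup)
    (cnt : PySem.Dict String Int) (sat : Int) (w : List String) (p : String)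
    (h1 : ∀ k ∈ req.keys, cnt.getD k 0 = (w.count k : Int))
    (h2 : sat = satSum req (fun k => (w.count k : Int))) :
    (∀ k ∈ req.keys, (addStep req (cnt, sat) p).1.getD k 0 = (((w ++ [p]).count k : Int))) ∧
      (addStep req (cnt, sat) p).2 = satSum req (fun k => ((w ++ [p]).count k : Int)) := by
  have hcnt_ne : ∀ k, k ≠ p → (w ++ [p]).count k = w.count k := by
    intro k hkp
    rw [List.count_append]
    simp [Ne.symm hkp]
  have hcnt_p : (w ++ [p]).count p = w.count p + 1 := by
    rw [List.count_append]; simp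
  unfold addStep
  by_cases hc : req.contains p = true
  · have hp : p ∈ req.keys := (PySem.Dict.contains_iff_mem_keys req p).mp hc
    simp only [hc, if_true]
    have hv : cnt.getD p 0 = (w.count p : Int) := h1 p hp
    have hself : (cnt.insert p (cnt.getD p 0 + 1)).getD p 0 = cnt.getD p 0 + 1 :=
      PySem.Dict.getD_insert_self cnt p _ 0
    constructor
    · intro k hk
      by_cases hkp : k = p
      · subst hkp
        rw [hself, hv, hcnt_p]; push_cast; ring
      · rw [PySem.Dict.getD_insert_of_ne cnt _ 0 hkp, h1 k hk, hcnt_ne k hkp]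
    · rw [hv] at hself
      simp only [hv, hself, beq_iff_eq]
      rw [satSum_congr req (fun k => ((w ++ [p]).count k : Int))
          (fun k => if k = p then (w.count p : Int) + 1 else (w.count k : Int))
          (by intro k hk; by_cases hkp : k = p
              · subst hkp; simp [hcnt_p]
              · simp [if_neg hkp, hcnt_ne k hkp])]
      rw [satSum_incr req hnd hp (fun k => (w.count k : Int)) (Int.natCast_nonneg _)]
      rw [h2]
      split_ifs <;> omega
  · have hpk : p ∉ req.keys := fun h => hc ((PySem.Dict.contains_iff_mem_keys req p).mpr h)
    simp only [hc]
    simp only [Bool.false_eq_true, if_false]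
    constructor
    · intro k hk
      rw [h1 k hk, hcnt_ne k (fun e => hpk (e ▸ hk))]
    · rw [h2]
      apply satSum_congr
      intro k hk
      rw [hcnt_ne k (fun e => hpk (e ▸ hk))]

lemma removeStep_inv (req : PySem.Dict String Int) (hnd : req.keys.Nodup)
    (cnt : PySem.Dict String Int) (sat : Int) (mid : List String) (p : String)
    (h1 : ∀ k ∈ req.keys, cnt.getD k 0 = ((p :: mid).count k : Int))
    (h2 : sat = satSum req (fun k => ((p :: mid).count k : Int))) :
    (∀ k ∈ req.keys, (removeStep req (cnt, sat) p).1.getD k 0 = ((mid.count k : Int))) ∧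
      (removeStep req (cnt, sat) p).2 = satSum req (fun k => (mid.count k : Int)) := by
  have hcnt_ne : ∀ k, k ≠ p → (p :: mid).count k = mid.count k := by
    intro k hkp
    rw [List.count_cons]; simp [Ne.symm hkp]
  have hcnt_p : (p :: mid).count p = mid.count p + 1 := by
    rw [List.count_cons]; simp
  unfold removeStep
  by_cases hc : req.contains p = true
  · have hp : p ∈ req.keys := (PySem.Dict.contains_iff_mem_keys req p).mp hc
    simp only [hc, if_true]
    have hv : cnt.getD p 0 = ((p :: mid).count p : Int) := h1 p hp
    constructor
    · intro k hk
      by_cases hkp : k = p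
      · subst hkp
        rw [PySem.Dict.getD_insert_self, hv, hcnt_p]; push_cast; ring
      · rw [PySem.Dict.getD_insert_of_ne cnt _ 0 hkp, h1 k hk, hcnt_ne k hkp]
    · simp only [hv, beq_iff_eq]
      have hrw : satSum req (fun k => (mid.count k : Int))
          = satSum req (fun k => if k = p then ((p :: mid).count p : Int) - 1 else ((p :: mid).count k : Int)) := by
        apply satSum_congr
        intro k hk
        by_cases hkp : k = p
        · subst hkp; simp only [hcnt_p]; push_cast; ring
        · simp [if_neg hkp, hcnt_ne k hkp]
      rw [hrw, satSum_decr req hnd hp (fun k => ((p :: mid).count k : Int))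
          (by simp only [hcnt_p]; push_cast; have := Int.natCast_nonneg (mid.count p); omega)]
      rw [h2]
      simp only [hcnt_p, Nat.cast_add, Nat.cast_one]
      split_ifs <;> omega
  · have hpk : p ∉ req.keys := fun h => hc ((PySem.Dict.contains_iff_mem_keys req p).mpr h)
    simp only [hc]
    simp only [Bool.false_eq_true, if_false]
    constructor
    · intro k hk
      rw [h1 k hk, hcnt_ne k (fun e => hpk (e ▸ hk))]
    · rw [h2]
      apply satSum_congr
      intro k hk
      rw [hcnt_ne k (fun e => hpk (e ▸ hk))]

lemma foldl_addStep_inv (req : PySem.Dict String Int) (hnd : req.keys.Nodup) :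
    ∀ (ws : List String) (cnt : PySem.Dict String Int) (sat : Int) (w : List String),
    (∀ k ∈ req.keys, cnt.getD k 0 = (w.count k : Int)) →
    sat = satSum req (fun k => (w.count k : Int)) →
    (∀ k ∈ req.keys, (ws.foldl (addStep req) (cnt, sat)).1.getD k 0 = (((w ++ ws).count k : Int))) ∧
      (ws.foldl (addStep req) (cnt, sat)).2 = satSum req (fun k => ((w ++ ws).count k : Int)) := by
  intro ws
  induction ws with
  | nil => intro cnt sat w h1 h2; simpa using ⟨h1, h2⟩
  | cons p rest ih =>
    intro cnt sat w h1 h2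
    rcases addStep_inv req hnd cnt sat w p h1 h2 with ⟨g1, g2⟩
    have := ih (addStep req (cnt, sat) p).1 (addStep req (cnt, sat) p).2 (w ++ [p]) g1 g2
    simpa using this

lemma whileA_eq (want : List String) (number : List Int) (discount : List String) :
    ∀ (fuel j : Nat) (g : Int), discount.length + 1 ≤ j + 10 + fuel →
    whileA want number discount (j : Int) ((j : Int) + 10) g
      = g + goodCnt (get_hash_table want number) (want.length : Int) discount j := by
  intro fuel
  induction fuel with
  | zero =>
    intro j g h
    rw [whileA, goodCnt]
    rw [dif_neg (by omega), if_neg (by omega)]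
    ring
  | succ n ih =>
    intro j g h
    rw [whileA, goodCnt]
    by_cases hle : j + 10 ≤ discount.length
    · rw [dif_pos (by omega), if_pos hle]
      have hsl : PySem.List.slice discount (some (j : Int)) (some ((j : Int) + 10))
          = (discount.drop j).take 10 := by
        have : ((j : Int) + 10) = ((j + 10 : Nat) : Int) := by push_cast; ring
        rw [this, PySem.List.slice_natCast]
        congr 1
        omega
      have hinner := innerLoopA_snd ((discount.drop j).take 10) (get_hash_table want number)
        (nodup_keys_req want number) 0
      simp only [hsl, hinner, zero_add, beq_iff_eq]
      have hrec := ih (j + 1) (if satSum (get_hash_table want number)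
          (fun k => (((discount.drop j).take 10).count k : Int)) = (want.length : Int)
          then g + 1 else g) (by omega)
      push_cast at hrec
      rw [show (j : Int) + 1 + 10 = (j : Int) + 10 + 1 by ring] at hrec
      rw [hrec]
      split_ifs <;> ring
    · rw [dif_neg (by omega), if_neg hle]; ring

lemma window_cons (discount : List String) (t : Nat) (h : t + 10 ≤ discount.length) :
    (discount.drop t).take 10
      = discount[t]'(by omega) :: ((discount.drop (t + 1)).take 9) := by
  rw [List.drop_eq_getElem_cons (by omega)]
  rfl

lemma window_snoc (discount : List String) (t : Nat) (h : t + 10 < discount.length) :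
    (discount.drop (t + 1)).take 10
      = ((discount.drop (t + 1)).take 9) ++ [discount[t + 10]'(by omega)] := by
  have h9 : 9 < (discount.drop (t + 1)).length := by
    rw [List.length_drop]; omega
  have e1 : (discount.drop (t + 1)).take 10
      = (discount.drop (t + 1)).take 9 ++ [(discount.drop (t + 1))[9]'h9] := by
    conv_lhs => rw [show (10:Nat) = 9 + 1 from rfl]
    rw [List.take_add_one, List.getElem?_eq_getElem h9]
    rfl
  rw [e1]
  congr 1
  rw [List.getElem_drop]

lemma slide_fold (req : PySem.Dict String Int) (hnd : req.keys.Nodup) (W : Int)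
    (discount : List String) :
    ∀ (fuel t : Nat) (cnt : PySem.Dict String Int) (sat good : Int),
    discount.length ≤ t + 10 + fuel →
    (∀ k ∈ req.keys, cnt.getD k 0 = (((discount.drop t).take 10).count k : Int)) →
    sat = satSum req (fun k => (((discount.drop t).take 10).count k : Int)) →
    (((discount.drop (t + 10)).zip (discount.drop t)).foldl (slideStep req W)
        (cnt, sat, good)).2.2 = good + goodCnt req W discount (t + 1) := by
  intro fuel
  induction fuel with
  | zero =>
    intro t cnt sat good hlen h1 h2
    rw [List.drop_eq_nil_of_le (by omega)]
    rw [goodCnt, if_neg (by omega)]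
    simp
  | succ n ih =>
    intro t cnt sat good hlen h1 h2
    by_cases hlt : t + 10 < discount.length
    · rw [List.drop_eq_getElem_cons (l := discount) (i := t + 10) (by omega),
        List.drop_eq_getElem_cons (l := discount) (i := t) (by omega)]
      rw [List.zip_cons_cons, List.foldl_cons]
      rw [window_cons discount t (by omega)] at h1 h2
      rcases removeStep_inv req hnd cnt sat ((discount.drop (t + 1)).take 9)
          (discount[t]'(by omega)) h1 h2 with ⟨r1, r2⟩
      have hadd := addStep_inv req hnd _ _ ((discount.drop (t + 1)).take 9)
          (discount[t + 10]'(by omega)) r1 r2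
      rw [← window_snoc discount t (by omega)] at hadd
      rcases hadd with ⟨a1, a2⟩
      have hstep : slideStep req W (cnt, sat, good) (discount[t + 10]'(by omega), discount[t]'(by omega))
          = ((addStep req ((removeStep req (cnt, sat) (discount[t]'(by omega))).1,
                (removeStep req (cnt, sat) (discount[t]'(by omega))).2) (discount[t + 10]'(by omega))).1,
             (addStep req ((removeStep req (cnt, sat) (discount[t]'(by omega))).1,
                (removeStep req (cnt, sat) (discount[t]'(by omega))).2) (discount[t + 10]'(by omega))).2,
             if (addStep req ((removeStep req (cnt, sat) (discount[t]'(by omega))).1,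
                (removeStep req (cnt, sat) (discount[t]'(by omega))).2) (discount[t + 10]'(by omega))).2 == W
             then good + 1 else good) := rfl
      rw [hstep]
      rw [show t + 10 + 1 = t + 1 + 10 by omega]
      rw [ih (t + 1) _ _ _ (by omega) a1 a2]
      conv_rhs => rw [goodCnt]
      rw [if_pos (show t + 1 + 10 ≤ discount.length by omega)]
      rw [a2]
      simp only [beq_iff_eq]
      split_ifs <;> ring
    · rw [List.drop_eq_nil_of_le (by omega)]
      rw [goodCnt, if_neg (by omega)]
      simp

-- ===== VERDICT (by name: the statement is the Claim_ definition above) =====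
theorem solution_spec : Claim_equal_solution := by
  intro want number discount _
  unfold Spec_solution
  set req := get_hash_table want number with hreq
  set W : Int := (want.length : Int) with hW
  -- A = goodCnt req W discount 0
  have hA : solution want number discount = goodCnt req W discount 0 := by
    unfold solution
    have := whileA_eq want number discount (discount.length + 1) 0 0 (by omega)
    simpa using this
  rw [hA]
  unfold solution_alt
  by_cases hlen : (discount.length : Int) < 10
  · rw [if_pos hlen]
    rw [goodCnt, if_neg (by omega)]
  · rw [if_neg hlen]
    have h10 : 10 ≤ discount.length := by omega
    have hnd : req.keys.Nodup := nodup_keys_req want number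
    have hsl0 : PySem.List.slice discount none (some 10) = discount.take 10 := by
      rw [PySem.List.slice_to discount (by norm_num)]
      rfl
    have hsl1 : PySem.List.slice discount (some 10) none = discount.drop 10 := by
      rw [PySem.List.slice_from discount (by norm_num)]
      rfl
    have hinit := foldl_addStep_inv req hnd (discount.take 10) PySem.Dict.empty 0 []
      (by intro k _; simp [PySem.Dict.getD_empty])
      (by rw [satSum_zero req _ (by intro k _; simp)])
    simp only [List.nil_append] at hinit
    rcases hinit with ⟨i1, i2⟩
    have hwin0 : discount.take 10 = (discount.drop 0).take 10 := by rw [List.drop_zero]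
    rw [hwin0] at i1 i2
    have hslide := slide_fold req hnd W discount discount.length 0
      ((discount.take 10).foldl (addStep req) (PySem.Dict.empty, 0)).1
      ((discount.take 10).foldl (addStep req) (PySem.Dict.empty, 0)).2
      (if ((discount.take 10).foldl (addStep req) (PySem.Dict.empty, 0)).2 == W then 1 else 0)
      (by omega) i1 i2
    simp only [List.drop_zero, Nat.zero_add] at hslide
    rw [buildReq_eq, ← hreq, hsl0, hsl1, hslide]
    conv_lhs => rw [goodCnt]
    rw [if_pos (show 0 + 10 ≤ discount.length by omega)]
    rw [List.drop_zero]
    rw [← hwin0] at i2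
    rw [i2]
    simp
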